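-- pv_equiv track=rewrite | github.com/dpjiangzhe/D3QN_maker | utils/action_utils.py | action_list_encoding
-- ===== SOURCE A (Python) =====
-- def action_list_encoding(actions, action_edge):
--     # action为0~action_edge，为常规挂单行动，编码调整到0～action_edge+1
--     # action为None，则属于不挂单行动，编码为最大值action_edge+1
--     _action_code = 0
--     nbase = action_edge + 2
--     for act in actions:
--         act_modi = nbase - 1
--         if act is not None:
--             act_modi = act
--         _action_code = _action_code * nbase + act_modi
--     return _action_code
-- ===== SOURCE B (Python) =====
-- def action_list_encoding(actions, action_edge):
--     acts = list(actions)
--     nbase = action_edge + 2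
--     digits = [nbase - 1 if act is None else act for act in acts]
--     total = 0
--     power = 1
--     for d in reversed(digits):
--         total += d * power
--         power *= nbase
--     return total
-- ===== Notes on version B (the rewrite author's own statement) =====
-- stated objective: alternative
-- what changed: Replaces Horner's left-to-right accumulator (code = code*nbase + digit) with a two-phase positional encoding: first map actions to a digit list, then sum digit*power right-to-left with an explicit running power of nbase.
import Mathlib
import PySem

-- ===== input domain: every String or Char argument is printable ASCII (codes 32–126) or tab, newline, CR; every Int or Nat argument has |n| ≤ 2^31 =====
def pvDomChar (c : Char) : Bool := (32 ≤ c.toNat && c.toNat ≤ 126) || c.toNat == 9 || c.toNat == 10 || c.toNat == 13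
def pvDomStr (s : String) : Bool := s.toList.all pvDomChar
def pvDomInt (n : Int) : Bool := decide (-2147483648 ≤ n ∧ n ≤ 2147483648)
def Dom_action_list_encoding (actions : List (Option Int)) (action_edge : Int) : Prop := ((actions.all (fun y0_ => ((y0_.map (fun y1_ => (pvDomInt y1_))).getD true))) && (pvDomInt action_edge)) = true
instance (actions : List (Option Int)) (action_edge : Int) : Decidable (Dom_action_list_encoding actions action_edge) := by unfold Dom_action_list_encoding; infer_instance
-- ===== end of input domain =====

-- ===== PORT A =====
-- Horner accumulator: code = code * nbase + digit, left to right.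
def action_list_encoding (actions : List (Option Int)) (action_edge : Int) : Int :=
  let nbase := action_edge + 2
  actions.foldl (fun code act =>
    let act_modi := match act with | none => nbase - 1 | some a => a
    code * nbase + act_modi) 0

-- ===== PORT B =====
-- B: map to digits, then sum digit * power right-to-left with a running power.
def action_list_encoding_alt (actions : List (Option Int)) (action_edge : Int) : Int :=
  let nbase := action_edge + 2
  let digits := actions.map (fun act => match act with | none => nbase - 1 | some a => a)
  (digits.reverse.foldl (fun (tp : Int × Int) d => (tp.1 + d * tp.2, tp.2 * nbase)) (0, 1)).1

-- ===== PRECONDITION & SPEC =====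
def Spec_action_list_encoding (actions : List (Option Int)) (action_edge : Int) (out : Int) : Prop := out = action_list_encoding_alt actions action_edge
instance (actions : List (Option Int)) (action_edge : Int) (out : Int) : Decidable (Spec_action_list_encoding actions action_edge out) := by unfold Spec_action_list_encoding; infer_instance

-- ===== CLAIM (what is proved, stated in full; the proofs are below) =====
def Claim_equal_action_list_encoding : Prop := ∀ (actions : List (Option Int)) (action_edge : Int), Dom_action_list_encoding actions action_edge → Spec_action_list_encoding actions action_edge (action_list_encoding actions action_edge)

-- ===== LEMMAS AND PROOFS =====

-- ===== VERDICT (by name: the statement is the Claim_ definition above) =====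
-- little-endian value of a digit list
def pvLE (n : Int) : List Int → Int
  | [] => 0
  | d :: l => d + n * pvLE n l

theorem pvLE_append (n d : Int) (l : List Int) :
    pvLE n (l ++ [d]) = pvLE n l + d * n ^ l.length := by
  induction l with
  | nil => simp [pvLE]
  | cons x l ih => simp [pvLE, ih, pow_succ]; ring

theorem pvB_fold (n : Int) (l : List Int) (t p : Int) :
    (l.foldl (fun (tp : Int × Int) d => (tp.1 + d * tp.2, tp.2 * n)) (t, p)).1
      = t + p * pvLE n l := by
  induction l generalizing t p with
  | nil => simp [pvLE]
  | cons d l ih => simp [List.foldl, pvLE, ih]; ring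

theorem pvA_fold (n : Int) (l : List Int) (a : Int) :
    (l.foldl (fun code d => code * n + d) a) = a * n ^ l.length + pvLE n l.reverse := by
  induction l generalizing a with
  | nil => simp [pvLE]
  | cons d l ih =>
      simp [List.foldl, ih, pvLE_append, pow_succ]; ring

theorem action_list_encoding_spec : Claim_equal_action_list_encoding := by
  intro actions action_edge _
  unfold Spec_action_list_encoding action_list_encoding action_list_encoding_alt
  simp only []
  have h := List.foldl_map
    (f := fun act : Option Int => match act with | none => action_edge + 2 - 1 | some a => a)
    (g := fun (code d : Int) => code * (action_edge + 2) + d)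
    (l := actions) (init := (0 : Int))
  rw [pvB_fold, ← h, pvA_fold]
  simp
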